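-- pv_equiv track=rewrite | github.com/Turbo31150/jarvis-core | core/jarvis_cron_scheduler.py | _matches_field
-- ===== SOURCE A (Python) =====
-- def _matches_field(value: int, expr: str) -> bool:
--     """Check if value matches a cron field expression."""
--     if expr == "*":
--         return True
--     if expr.startswith("*/"):
--         step = int(expr[2:])
--         return value % step == 0
--     if "," in expr:
--         return any(_matches_field(value, part) for part in expr.split(","))
--     if "-" in expr:
--         lo, hi = expr.split("-", 1)
--         return int(lo) <= value <= int(hi)
--     return value == int(expr)
-- ===== SOURCE B (Python) =====
-- def _parse_atom(part: str):
--     """Compile one comma-free cron atom into a tagged tuple."""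
--     if part == "*":
--         return ("star",)
--     if part.startswith("*/"):
--         return ("step", int(part[2:]))
--     if "-" in part:
--         lo, hi = part.split("-", 1)
--         return ("range", int(lo), int(hi))
--     return ("eq", int(part))
--
--
-- def _eval_atom(value: int, atom) -> bool:
--     """Evaluate a compiled atom against a value."""
--     kind = atom[0]
--     if kind == "star":
--         return True
--     if kind == "step":
--         return value % atom[1] == 0
--     if kind == "range":
--         return atom[1] <= value <= atom[2]
--     return value == atom[1]
--
--
-- def _matches_field(value: int, expr: str) -> bool:
--     """Check if value matches a cron field expression."""
--     atoms = [_parse_atom(part) for part in expr.split(",")]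
--     return any(_eval_atom(value, atom) for atom in atoms)
-- ===== Notes on version B (the rewrite author's own statement) =====
-- stated objective: alternative
-- what changed: B compiles the expression in a first pass into a list of tagged atoms (star/step/range/eq) and then evaluates those atoms against the value in a second pass, replacing A's self-recursive direct string checking.
-- outside the precondition, e.g. on _matches_field(5, '5,x'): A returns True, B raises ValueError; on _matches_field(3, '5-x'): A returns False, B raises ValueError
import Mathlib
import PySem

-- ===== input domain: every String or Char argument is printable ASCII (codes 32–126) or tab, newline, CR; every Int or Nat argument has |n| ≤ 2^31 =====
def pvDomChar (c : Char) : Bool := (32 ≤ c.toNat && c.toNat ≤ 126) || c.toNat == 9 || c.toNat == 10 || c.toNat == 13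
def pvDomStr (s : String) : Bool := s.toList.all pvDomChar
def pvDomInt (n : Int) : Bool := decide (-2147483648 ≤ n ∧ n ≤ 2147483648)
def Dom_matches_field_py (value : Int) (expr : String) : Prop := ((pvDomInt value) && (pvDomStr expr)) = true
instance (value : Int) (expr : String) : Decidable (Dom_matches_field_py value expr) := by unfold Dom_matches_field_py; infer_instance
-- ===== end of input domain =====

-- B compiles the expression into a list of tagged atoms (star/step/range/eq) in a
-- first pass and evaluates the atoms against the value in a second pass, instead of
-- A's self-recursive direct string checking ('alternative': same cost, staged design).

-- ===== PORT A =====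
-- Helper lemmas the port needs for termination of its recursion over the comma parts
-- (PySem.Chars.splitOn expressed through List.splitOnP, and parts are shorter when ',' occurs).
theorem pvGo_eq (c : Char) (fuel : Nat) (l cur : List Char) (acc : List (List Char))
    (h : l.length < fuel) :
    PySem.Chars.splitOn.go [c] fuel l cur acc
      = acc.reverse ++ List.modifyHead (fun x => cur.reverse ++ x) (List.splitOnP (· == c) l) := by
  induction fuel generalizing l cur acc with
  | zero => omega
  | succ f ih =>
    cases l with
    | nil =>
      simp [PySem.Chars.splitOn.go, List.splitOnP_nil]
    | cons a rest =>
      rw [PySem.Chars.splitOn.go]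
      by_cases hac : a = c
      · subst hac
        have hpre : List.isPrefixOf [a] (a :: rest) = true := by
          simp [List.isPrefixOf]
        simp only [hpre, if_true, List.length_cons, List.length_nil, List.drop_succ_cons,
          List.drop_zero]
        rw [ih rest [] (cur.reverse :: acc) (by simpa using Nat.lt_of_succ_lt_succ h)]
        rw [List.splitOnP_cons]
        simp
        exact congrFun List.modifyHead_id _
      · have hpre : List.isPrefixOf [c] (a :: rest) = false := by
          simp [List.isPrefixOf]
          intro hh; exact absurd hh.symm hac
        simp only [hpre, Bool.false_eq_true, if_false]
        rw [ih rest (a :: cur) acc (by simpa using Nat.lt_of_succ_lt_succ h)]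
        rw [List.splitOnP_cons]
        simp only [beq_iff_eq, hac]
        rcases hps : List.splitOnP (· == c) rest with _ | ⟨hd, tl⟩
        · exact absurd hps (List.splitOnP_ne_nil _ _)
        · simp

theorem pvSplitOn_eq (l : List Char) (c : Char) :
    PySem.Chars.splitOn l [c] = List.splitOnP (· == c) l := by
  show PySem.Chars.splitOn.go [c] (l.length + 1) l [] [] = _
  rw [pvGo_eq c (l.length + 1) l [] [] (by omega)]
  rcases hps : List.splitOnP (· == c) l with _ | ⟨hd, tl⟩
  · exact absurd hps (List.splitOnP_ne_nil _ _)
  · simp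

theorem pvSplitOnP_le (c : Char) {l part : List Char}
    (hp : part ∈ List.splitOnP (· == c) l) : part.length ≤ l.length := by
  induction l generalizing part with
  | nil => simp [List.splitOnP_nil] at hp; simp [hp]
  | cons a rest ih =>
    rw [List.splitOnP_cons] at hp
    by_cases hac : a = c
    · simp only [hac, beq_self_eq_true, if_true, List.mem_cons] at hp
      rcases hp with h | h
      · simp [h]
      · exact Nat.le_succ_of_le (ih h)
    · have hne : a = c → False := hac
      simp only [beq_iff_eq, if_neg hne] at hp
      rcases hps : List.splitOnP (· == c) rest with _ | ⟨hd, tl⟩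
      · exact absurd hps (List.splitOnP_ne_nil _ _)
      · rw [hps] at hp
        simp only [List.modifyHead_cons, List.mem_cons] at hp
        rcases hp with h | h
        · have : hd.length ≤ rest.length := ih (by simp [hps])
          simp [h]; omega
        · have : part.length ≤ rest.length := ih (by simp [hps, h])
          simpa using Nat.le_succ_of_le this

theorem pvSplitOnP_lt (c : Char) {l part : List Char} (hc : c ∈ l)
    (hp : part ∈ List.splitOnP (· == c) l) : part.length < l.length := by
  induction l generalizing part with
  | nil => cases hc
  | cons a rest ih =>
    rw [List.splitOnP_cons] at hp
    by_cases hac : a = c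
    · simp only [hac, beq_self_eq_true, if_true, List.mem_cons] at hp
      rcases hp with h | h
      · simp [h]
      · have := pvSplitOnP_le c h
        simp; omega
    · have hcr : c ∈ rest := by
        rcases List.mem_cons.mp hc with h | h
        · exact absurd h.symm hac
        · exact h
      have hne : a = c → False := hac
      simp only [beq_iff_eq, if_neg hne] at hp
      rcases hps : List.splitOnP (· == c) rest with _ | ⟨hd, tl⟩
      · exact absurd hps (List.splitOnP_ne_nil _ _)
      · rw [hps] at hp
        simp only [List.modifyHead_cons, List.mem_cons] at hp
        rcases hp with h | h
        · have : hd.length < rest.length := ih hcr (by simp [hps])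
          simp [h]; omega
        · have : part.length < rest.length := ih hcr (by simp [hps, h])
          simpa using Nat.lt_succ_of_lt this

theorem pvSplit_lt_of_isIn {c : Char} {e part : List Char}
    (hc : PySem.Chars.isIn [c] e = true) (hp : part ∈ PySem.Chars.splitOn e [c]) :
    part.length < e.length := by
  rw [pvSplitOn_eq] at hp
  exact pvSplitOnP_lt c ((List.singleton_infix_iff c e).mp
    ((PySem.Chars.isIn_iff_infix [c] e).mp hc)) hp

-- literal transliteration of A (self-recursive over the comma parts);
-- 'none' cases of the PySem primitives are where the Python raises (outside Pre_)
def pvMatchA (value : Int) (e : List Char) : Bool :=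
  if e = ['*'] then true
  else if PySem.Chars.startswith e ['*', '/'] then
    match PySem.Int.ofChars? (PySem.Chars.slice e (some 2) none) with   -- int(expr[2:])
    | some step =>
      match PySem.Int.mod? value step with                              -- value % step
      | some r => r == 0
      | none => false                                                   -- ZeroDivisionError
    | none => false                                                     -- ValueError
  else if hc : PySem.Chars.isIn [','] e = true then
    (PySem.Chars.splitOn e [',']).attach.any (fun p => pvMatchA value p.1)
  else if PySem.Chars.isIn ['-'] e = true then
    match PySem.Chars.splitOnMax e ['-'] 1 with                         -- expr.split("-", 1)
    | [lo, hi] =>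
      match PySem.Int.ofChars? lo with
      | some l =>
        if l ≤ value then
          match PySem.Int.ofChars? hi with                              -- chained comparison:
          | some h => decide (value ≤ h)                                -- int(hi) only if int(lo) <= value
          | none => false                                               -- ValueError
        else false
      | none => false                                                   -- ValueError
    | _ => false
  else
    match PySem.Int.ofChars? e with
    | some n => value == n
    | none => false                                                     -- ValueError
termination_by e.length
decreasing_by exact pvSplit_lt_of_isIn hc p.2

def matches_field_py (value : Int) (expr : String) : Bool :=
  pvMatchA value expr.toList

-- ===== PORT B =====
-- the compiled form of one comma-free cron atom
inductive PvAtom : Type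
  | star : PvAtom
  | step : Int → PvAtom
  | rng : Int → Int → PvAtom
  | eq : Int → PvAtom
deriving DecidableEq, Repr

-- _parse_atom: compile one part ('none' where the Python raises ValueError)
def pvParseAtom (p : List Char) : Option PvAtom :=
  if p = ['*'] then some PvAtom.star
  else if PySem.Chars.startswith p ['*', '/'] then
    match PySem.Int.ofChars? (PySem.Chars.slice p (some 2) none) with
    | some n => some (PvAtom.step n)
    | none => none
  else if PySem.Chars.isIn ['-'] p = true then
    match PySem.Chars.splitOnMax p ['-'] 1 with
    | [lo, hi] =>
      match PySem.Int.ofChars? lo with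
      | some l =>
        match PySem.Int.ofChars? hi with
        | some h => some (PvAtom.rng l h)
        | none => none
      | none => none
    | _ => none
  else
    match PySem.Int.ofChars? p with
    | some n => some (PvAtom.eq n)
    | none => none

-- the list comprehension: parse every part, first failure aborts
def pvParseAll : List (List Char) → Option (List PvAtom)
  | [] => some []
  | p :: rest =>
    match pvParseAtom p with
    | some a =>
      match pvParseAll rest with
      | some as => some (a :: as)
      | none => none
    | none => none

-- _eval_atom: evaluate a compiled atom against the value
def pvEvalAtom (value : Int) : PvAtom → Bool
  | PvAtom.star => true
  | PvAtom.step n =>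
    match PySem.Int.mod? value n with
    | some r => r == 0
    | none => false
  | PvAtom.rng l h => decide (l ≤ value) && decide (value ≤ h)
  | PvAtom.eq n => value == n

def matches_field_py_alt (value : Int) (expr : String) : Bool :=
  match pvParseAll (PySem.Chars.splitOn expr.toList [',']) with
  | some atoms => atoms.any (fun a => pvEvalAtom value a)
  | none => false

-- ===== PRECONDITION & SPEC =====
-- well-formed single cron atom: exactly the comma-free parts on which Python's
-- _matches_field evaluates without raising (int() parses, step nonzero)
def pvWfPart (p : List Char) : Bool :=
  if p = ['*'] then true
  else if PySem.Chars.startswith p ['*', '/'] then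
    match PySem.Int.ofChars? (PySem.Chars.slice p (some 2) none) with
    | some s => s != 0
    | none => false
  else if PySem.Chars.isIn ['-'] p = true then
    match PySem.Chars.splitOnMax p ['-'] 1 with
    | [lo, hi] => (PySem.Int.ofChars? lo).isSome && (PySem.Int.ofChars? hi).isSome
    | _ => false
  else (PySem.Int.ofChars? p).isSome

-- Pre_ admits expressions whose every comma part is a well-formed atom (and a '*/…'
-- expression only when it is comma-free, since A parses the whole tail as one int there).
-- It excludes malformed expressions on which A raises, and is slightly narrower than A's
-- domain: A can also return via short-circuit before reaching a malformed later part
-- (e.g. "5,x" with value 5, or "5-x" with value 3), where B's eager compile pass raises.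
def pvWfExpr (e : List Char) : Bool :=
  (!(PySem.Chars.startswith e ['*', '/']) || !(PySem.Chars.isIn [','] e))
    && (PySem.Chars.splitOn e [',']).all pvWfPart

def Pre_matches_field_py (_value : Int) (expr : String) : Prop :=
  pvWfExpr expr.toList = true

instance (value : Int) (expr : String) : Decidable (Pre_matches_field_py value expr) := by
  unfold Pre_matches_field_py; infer_instance

def pvWitness_matches_field_py : Int × String := (7, "1-5,*/2")

def Spec_matches_field_py (value : Int) (expr : String) (out : Bool) : Prop :=
  out = matches_field_py_alt value expr
instance (value : Int) (expr : String) (out : Bool) : Decidable (Spec_matches_field_py value expr out) := by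
  unfold Spec_matches_field_py; infer_instance

-- ===== CLAIM (what is proved, stated in full; the proofs are below) =====
def Claim_equal_matches_field_py : Prop := ∀ (value : Int) (expr : String), Dom_matches_field_py value expr → Pre_matches_field_py value expr → Spec_matches_field_py value expr (matches_field_py value expr)

-- ===== LEMMAS AND PROOFS =====
theorem pvAny_attach {α : Type} (l : List α) (f : α → Bool) :
    l.attach.any (fun p => f p.1) = l.any f := by
  conv_rhs => rw [← List.attach_map_subtype_val l]
  rw [List.any_map]
  rfl

theorem pvSplitOnP_not_mem (c : Char) {l part : List Char}
    (hp : part ∈ List.splitOnP (· == c) l) : c ∉ part := by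
  induction l generalizing part with
  | nil => simp [List.splitOnP_nil] at hp; simp [hp]
  | cons a rest ih =>
    rw [List.splitOnP_cons] at hp
    by_cases hac : a = c
    · simp only [hac, beq_self_eq_true, if_true, List.mem_cons] at hp
      rcases hp with h | h
      · simp [h]
      · exact ih h
    · have hne : a = c → False := hac
      simp only [beq_iff_eq, if_neg hne] at hp
      rcases hps : List.splitOnP (· == c) rest with _ | ⟨hd, tl⟩
      · exact absurd hps (List.splitOnP_ne_nil _ _)
      · rw [hps] at hp
        simp only [List.modifyHead_cons, List.mem_cons] at hp
        rcases hp with h | h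
        · have : c ∉ hd := ih (by simp [hps])
          simp [h, List.mem_cons]
          exact ⟨fun hh => hac hh.symm, this⟩
        · exact ih (by simp [hps, h])

theorem pvSplitOnP_of_not_mem (c : Char) {l : List Char} (h : c ∉ l) :
    List.splitOnP (· == c) l = [l] := by
  induction l with
  | nil => simp [List.splitOnP_nil]
  | cons a rest ih =>
    rw [List.splitOnP_cons]
    have hac : ¬ a = c := fun hh => h (by simp [hh])
    have hcr : c ∉ rest := fun hh => h (by simp [hh])
    simp only [beq_iff_eq, if_neg hac, ih hcr, List.modifyHead_cons]

-- on a well-formed comma-free part, compiling succeeds and evaluating the atom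
-- computes exactly what A's direct check computes
theorem pvParse_eval (value : Int) (p : List Char) (hnc : ',' ∉ p)
    (hwf : pvWfPart p = true) :
    ∃ a, pvParseAtom p = some a ∧ pvEvalAtom value a = pvMatchA value p := by
  have hcIn : PySem.Chars.isIn [','] p = false := by
    rw [PySem.Chars.isIn_eq_false_iff]
    exact fun hinf => hnc ((List.singleton_infix_iff ',' p).mp hinf)
  rw [pvMatchA]
  rw [pvParseAtom]
  unfold pvWfPart at hwf
  by_cases h1 : p = ['*']
  · exact ⟨PvAtom.star, by simp [h1], by simp [h1, pvEvalAtom]⟩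
  · rw [if_neg h1] at hwf ⊢
    rw [if_neg h1]
    by_cases h2 : PySem.Chars.startswith p ['*', '/'] = true
    · rw [if_pos h2] at hwf ⊢
      rw [if_pos h2]
      rcases hparse : PySem.Int.ofChars? (PySem.Chars.slice p (some 2) none) with _ | s
      · rw [hparse] at hwf; exact absurd hwf (by simp)
      · exact ⟨PvAtom.step s, rfl, by simp [pvEvalAtom]⟩
    · rw [if_neg h2] at hwf ⊢
      rw [if_neg h2]
      simp only [hcIn, Bool.false_eq_true, dite_false]
      by_cases h3 : PySem.Chars.isIn ['-'] p = true
      · rw [if_pos h3] at hwf ⊢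
        rw [if_pos h3]
        rcases hsp : PySem.Chars.splitOnMax p ['-'] 1 with _ | ⟨lo, rest2⟩
        · rw [hsp] at hwf; exact absurd hwf (by simp)
        rcases rest2 with _ | ⟨hi, rest3⟩
        · rw [hsp] at hwf; exact absurd hwf (by simp)
        rcases rest3 with _ | ⟨q, rest4⟩
        · rw [hsp] at hwf
          simp only [] at hwf ⊢
          rw [Bool.and_eq_true, Option.isSome_iff_exists, Option.isSome_iff_exists] at hwf
          obtain ⟨⟨l, hlo⟩, ⟨h, hhi⟩⟩ := hwf
          rw [hlo, hhi]
          refine ⟨PvAtom.rng l h, rfl, ?_⟩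
          by_cases hlv : l ≤ value
          · simp [pvEvalAtom, hlv]
          · simp [pvEvalAtom, hlv]
        · rw [hsp] at hwf; exact absurd hwf (by simp)
      · rw [if_neg h3] at hwf ⊢
        rw [if_neg h3]
        rcases hparse : PySem.Int.ofChars? p with _ | n <;> rw [hparse] at hwf
        · exact absurd hwf (by simp)
        · exact ⟨PvAtom.eq n, rfl, by simp [pvEvalAtom]⟩

-- on a list of well-formed comma-free parts, the whole compile pass succeeds
theorem pvParseAll_isSome (l : List (List Char))
    (hwf : ∀ p ∈ l, pvWfPart p = true) (hnc : ∀ p ∈ l, ',' ∉ p) :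
    ∃ atoms, pvParseAll l = some atoms := by
  induction l with
  | nil => exact ⟨[], rfl⟩
  | cons p rest ih =>
    obtain ⟨a, hpa, -⟩ := pvParse_eval 0 p (hnc p (by simp)) (hwf p (by simp))
    obtain ⟨atoms, hrest⟩ := ih (fun q hq => hwf q (by simp [hq])) (fun q hq => hnc q (by simp [hq]))
    exact ⟨a :: atoms, by rw [pvParseAll, hpa, hrest]⟩

-- lifted to lists of parts: compile-then-evaluate equals A's per-part check
theorem pvParseAll_eval (value : Int) (l : List (List Char))
    (hwf : ∀ p ∈ l, pvWfPart p = true) (hnc : ∀ p ∈ l, ',' ∉ p) :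
    (match pvParseAll l with
     | some atoms => atoms.any (fun a => pvEvalAtom value a)
     | none => false) = l.any (pvMatchA value) := by
  induction l with
  | nil => simp [pvParseAll]
  | cons p rest ih =>
    obtain ⟨a, hpa, heq⟩ :=
      pvParse_eval value p (hnc p (by simp)) (hwf p (by simp))
    rw [pvParseAll, hpa]
    have ihr := ih (fun q hq => hwf q (by simp [hq])) (fun q hq => hnc q (by simp [hq]))
    obtain ⟨atoms, hrest⟩ := pvParseAll_isSome rest
      (fun q hq => hwf q (by simp [hq])) (fun q hq => hnc q (by simp [hq]))
    rw [hrest] at ihr ⊢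
    simp only [List.any_cons]
    rw [← ihr, heq]

theorem matches_field_py_spec : Claim_equal_matches_field_py := by
  intro value expr _hdom hpre
  unfold Spec_matches_field_py
  unfold Pre_matches_field_py pvWfExpr at hpre
  rw [Bool.and_eq_true] at hpre
  obtain ⟨hguard, hall⟩ := hpre
  unfold matches_field_py matches_field_py_alt
  have hwfparts : ∀ p ∈ PySem.Chars.splitOn expr.toList [','], pvWfPart p = true := by
    intro p hp
    simp only [List.all_eq_true] at hall
    exact hall p hp
  by_cases hc : ',' ∈ expr.toList
  · -- comma present: A takes the comma branch (Pre_ rules out '*' and '*/…' here)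
    have hIn : PySem.Chars.isIn [','] expr.toList = true := by
      rw [PySem.Chars.isIn_iff_infix]
      exact (List.singleton_infix_iff ',' expr.toList).mpr hc
    have hstar : ¬ (expr.toList = ['*']) := by
      intro h; rw [h] at hc; simp at hc
    have hsw : PySem.Chars.startswith expr.toList ['*', '/'] = false := by
      rw [hIn] at hguard
      simpa using hguard
    rw [pvMatchA]
    rw [if_neg hstar, hsw]
    simp only [Bool.false_eq_true, if_false, hIn, dif_pos]
    rw [pvAny_attach]
    exact (pvParseAll_eval value _ hwfparts (fun p hp => by
      rw [pvSplitOn_eq] at hp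
      exact pvSplitOnP_not_mem ',' hp)).symm
  · -- no comma: the split is [expr]; one compiled atom, evaluated once
    have hsingle : PySem.Chars.splitOn expr.toList [','] = [expr.toList] := by
      rw [pvSplitOn_eq]
      exact pvSplitOnP_of_not_mem ',' hc
    rw [hsingle] at hwfparts ⊢
    rw [pvParseAll_eval value _ hwfparts (fun p hp => by
      rw [List.mem_singleton] at hp; subst hp; exact hc)]
    simp
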